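-- pv_equiv track=rewrite | github.com/SrTesch/studying | learningPython/monitoria/lista3/q8.py | Escadinha
-- ===== SOURCE A (Python) =====
-- def Escadinha(lista):
--     escada = 1
--     diferença = lista[1] - lista[0]
--     for i in range(1,len(lista)):
--         if (lista[i] - lista[i-1] != diferença):
--             escada+=1
--             diferença = lista[i] - lista[i-1]
--     return escada
-- ===== SOURCE B (Python) =====
-- def Escadinha(lista):
--     diffs = [b - a for a, b in zip(lista, lista[1:])]
--     count = 0
--     i = 0
--     n = len(diffs)
--     while i < n:
--         # skip to the end of the maximal run starting at i
--         j = i + 1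
--         while j < n and diffs[j] == diffs[i]:
--             j += 1
--         count += 1
--         i = j
--     return count
-- ===== Notes on version B (the rewrite author's own statement) =====
-- stated objective: alternative
-- what changed: B builds the consecutive-difference table once and segments it into maximal runs with a two-pointer sweep (inner pointer skips to the run end), counting one per run, instead of A's single stateful scan carrying (count, current difference).
-- outside the precondition, e.g. on Escadinha([1]): A raises IndexError, B returns 0
import Mathlib
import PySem

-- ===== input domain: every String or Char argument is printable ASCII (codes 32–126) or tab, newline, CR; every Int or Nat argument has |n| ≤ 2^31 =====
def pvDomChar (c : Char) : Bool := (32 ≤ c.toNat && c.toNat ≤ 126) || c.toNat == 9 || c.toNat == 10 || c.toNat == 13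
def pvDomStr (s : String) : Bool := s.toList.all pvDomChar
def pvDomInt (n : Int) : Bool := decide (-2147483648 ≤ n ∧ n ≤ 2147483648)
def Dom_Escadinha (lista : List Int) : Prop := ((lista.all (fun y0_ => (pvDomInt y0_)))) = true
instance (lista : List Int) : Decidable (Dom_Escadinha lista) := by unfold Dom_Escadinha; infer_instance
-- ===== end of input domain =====

-- B segments the difference table into maximal runs with a two-pointer sweep instead of A's stateful scan; same asymptotic cost.

-- ===== PORT A =====
-- A's stateful scan: carries (escada, diferença); lista[1]-lista[0] is read before the loop
-- (IndexError for len < 2, excluded by Pre_; pyGetD's default is never used inside Pre_).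
def Escadinha (lista : List Int) : Int :=
  let diferenca : Int := PySem.List.pyGetD lista 1 0 - PySem.List.pyGetD lista 0 0
  let r := (PySem.List.pyRange 1 (lista.length : Int) 1).foldl
    (fun (s : Int × Int) i =>
      if PySem.List.pyGetD lista i 0 - PySem.List.pyGetD lista (i - 1) 0 ≠ s.2 then
        (s.1 + 1, PySem.List.pyGetD lista i 0 - PySem.List.pyGetD lista (i - 1) 0)
      else s)
    ((1 : Int), diferenca)
  r.1

-- ===== PORT B =====
-- diffs = [b - a for a, b in zip(lista, lista[1:])]
def pvDiffs (lista : List Int) : List Int :=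
  (lista.zip (lista.drop 1)).map (fun p => p.2 - p.1)

-- the inner while loop: skip the elements equal to the current run's first value
def pvSkip (d : Int) : List Int → List Int
  | [] => []
  | x :: xs => if x = d then pvSkip d xs else x :: xs

theorem pvSkip_length_le (d : Int) (l : List Int) : (pvSkip d l).length ≤ l.length := by
  induction l with
  | nil => simp [pvSkip]
  | cons x xs ih =>
    simp only [pvSkip]
    split
    · exact le_trans ih (Nat.le_succ _)
    · exact le_refl _

-- the outer while loop over run starts, as structural recursion on the remaining table:
-- 0 for the empty table, else 1 + the count for the table with its leading run removed
def pvRuns : List Int → Int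
  | [] => 0
  | d :: ds => 1 + pvRuns (pvSkip d ds)
termination_by l => l.length
decreasing_by
  exact Nat.lt_succ_of_le (pvSkip_length_le d ds)

def Escadinha_alt (lista : List Int) : Int :=
  pvRuns (pvDiffs lista)

-- ===== PRECONDITION & SPEC =====
-- Pre_ excludes exactly the lists of length < 2, on which A raises IndexError at lista[1].
def Pre_Escadinha (lista : List Int) : Prop := 2 ≤ lista.length
instance (lista : List Int) : Decidable (Pre_Escadinha lista) := by unfold Pre_Escadinha; infer_instance
def pvWitness_Escadinha : List Int := [1, 3, 5, 6]

def Spec_Escadinha (lista : List Int) (out : Int) : Prop := out = Escadinha_alt lista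
instance (lista : List Int) (out : Int) : Decidable (Spec_Escadinha lista out) := by unfold Spec_Escadinha; infer_instance

-- ===== CLAIM (what is proved, stated in full; the proofs are below) =====
def Claim_equal_Escadinha : Prop := ∀ (lista : List Int), Dom_Escadinha lista → Pre_Escadinha lista → Spec_Escadinha lista (Escadinha lista)

-- ===== LEMMAS AND PROOFS =====

-- A's loop body as a function of the difference it reads
def pvStep (s : Int × Int) (x : Int) : Int × Int :=
  if x ≠ s.2 then (s.1 + 1, x) else s

theorem pvDiffs_length (l : List Int) : (pvDiffs l).length = l.length - 1 := by
  simp [pvDiffs]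

theorem pvDiffs_getElem (l : List Int) (j : Nat) (hj : j + 1 < l.length) :
    (pvDiffs l)[j]'(by rw [pvDiffs_length]; omega) = l[j + 1] - l[j] := by
  simp [pvDiffs]

theorem pyGetD_int (l : List Int) (i : Int) (h0 : 0 ≤ i) (h : i < l.length) :
    PySem.List.pyGetD l i 0 = l[i.toNat]'(by omega) :=
  PySem.List.pyGetD_eq_getElem l 0 h0 (by exact_mod_cast h)

-- the difference read in A's loop body at index j is the (j-1)-th difference-table entry
theorem stepDiff (l : List Int) (j : Nat) (h1 : 1 ≤ j) (hj : j < l.length) :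
    PySem.List.pyGetD l (j : Int) 0 - PySem.List.pyGetD l ((j : Int) - 1) 0
      = PySem.List.pyGetD (pvDiffs l) ((j : Int) - 1) 0 := by
  have e1 : ((j : Int) - 1) = ((j - 1 : Nat) : Int) := by omega
  rw [e1, pyGetD_int l (j : Int) (by omega) (by exact_mod_cast hj),
      pyGetD_int l ((j - 1 : Nat) : Int) (by omega) (by omega),
      pyGetD_int (pvDiffs l) ((j - 1 : Nat) : Int) (by omega)
        (by rw [pvDiffs_length]; omega)]
  simp only [Int.toNat_natCast]
  rw [pvDiffs_getElem l (j - 1) (by omega)]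
  congr 2
  omega

-- bridge: A's pyRange/pyGetD fold from index k+1 is the list fold of pvStep over the diffs from position k
theorem A_bridge (l : List Int) :
    ∀ (n k : Nat) (s : Int × Int), l.length - (k + 1) = n →
    (PySem.List.pyRange ((k : Int) + 1) (l.length : Int) 1).foldl
      (fun (s : Int × Int) i =>
        if PySem.List.pyGetD l i 0 - PySem.List.pyGetD l (i - 1) 0 ≠ s.2 then
          (s.1 + 1, PySem.List.pyGetD l i 0 - PySem.List.pyGetD l (i - 1) 0)
        else s) s
    = ((pvDiffs l).drop k).foldl pvStep s := by
  intro n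
  induction n with
  | zero =>
    intro k s hk
    rw [PySem.List.pyRange_one_eq_nil (by omega), List.drop_eq_nil_of_le (by rw [pvDiffs_length]; omega)]
    simp
  | succ m ih =>
    intro k s hk
    have hk1 : k + 1 < l.length := by omega
    rw [PySem.List.pyRange_one_cons (by exact_mod_cast (by omega : ((k : Int) + 1) < (l.length : Int)))]
    simp only [List.foldl_cons]
    have hdrop : (pvDiffs l).drop k = (pvDiffs l)[k]'(by rw [pvDiffs_length]; omega) :: (pvDiffs l).drop (k + 1) := by
      exact (List.drop_eq_getElem_cons (by rw [pvDiffs_length]; omega))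
    rw [hdrop]
    simp only [List.foldl_cons]
    have hd := stepDiff l (k + 1) (by omega) hk1
    push_cast at hd
    rw [show ((k : Int) + 1 - 1) = (k : Int) from by ring] at hd
    rw [show ((k : Int) + 1 - 1) = (k : Int) from by ring]
    have hgd : PySem.List.pyGetD (pvDiffs l) ((k : Int)) 0 = (pvDiffs l)[k]'(by rw [pvDiffs_length]; omega) := by
      rw [pyGetD_int (pvDiffs l) ((k : Int)) (by omega) (by rw [pvDiffs_length]; push_cast; omega)]
      simp
    rw [hd, hgd]
    have hrec := ih (k + 1) (pvStep s ((pvDiffs l)[k]'(by rw [pvDiffs_length]; omega))) (by omega)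
    push_cast at hrec ⊢
    rw [← hrec]
    simp only [pvStep]
  
-- counting: folding pvStep over l starting with carried value d gives c - 1 + the run count of d :: l
theorem count_runs (l : List Int) : ∀ (c d : Int),
    (l.foldl pvStep (c, d)).1 = c - 1 + pvRuns (d :: l) := by
  induction l with
  | nil =>
    intro c d
    have h0 : pvRuns [] = 0 := by rw [pvRuns.eq_def]
    have h1 : pvRuns [d] = 1 := by
      conv_lhs => rw [pvRuns.eq_def]
      simp [pvSkip, h0]
    simp only [List.foldl_nil, h1]
    ring
  | cons x xs ih =>
    intro c d
    by_cases hx : x = d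
    · subst hx
      simp only [List.foldl_cons, pvStep, ne_eq, not_true_eq_false]
      rw [if_neg (by simp), ih c x]
      have h2 : pvRuns (x :: x :: xs) = pvRuns (x :: xs) := by
        conv_lhs => rw [pvRuns.eq_def]
        conv_rhs => rw [pvRuns.eq_def]
        simp [pvSkip]
      rw [h2]
    · simp only [List.foldl_cons, pvStep]
      rw [if_pos (by simpa using hx), ih (c + 1) x]
      have h1 : pvRuns (d :: x :: xs) = 1 + pvRuns (x :: xs) := by
        conv_lhs => rw [pvRuns.eq_def]
        simp [pvSkip, hx]
      rw [h1]
      ring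

-- ===== VERDICT (by name: the statement is the Claim_ definition above) =====
theorem Escadinha_spec : Claim_equal_Escadinha := by
  intro lista _ hpre
  unfold Spec_Escadinha Escadinha Escadinha_alt
  have h2 : 2 ≤ lista.length := hpre
  have hbr := A_bridge lista (lista.length - 1) 0
    ((1 : Int), PySem.List.pyGetD lista 1 0 - PySem.List.pyGetD lista 0 0) (by omega)
  push_cast at hbr
  simp only [List.drop_zero] at hbr
  simp only [hbr]
  -- diffs is nonempty and starts with d0 = lista[1] - lista[0]
  have hlen : 1 ≤ (pvDiffs lista).length := by rw [pvDiffs_length]; omega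
  obtain ⟨d0, tl, hds⟩ : ∃ d0 tl, pvDiffs lista = d0 :: tl := by
    cases h : pvDiffs lista with
    | nil => rw [h] at hlen; simp at hlen
    | cons a b => exact ⟨a, b, rfl⟩
  have hd0 : PySem.List.pyGetD lista 1 0 - PySem.List.pyGetD lista 0 0 = d0 := by
    have hsd := stepDiff lista 1 (le_refl 1) (by omega)
    push_cast at hsd
    rw [hsd, pyGetD_int (pvDiffs lista) 0 (by omega) (by omega)]
    simp [hds]
  rw [hd0, hds, count_runs]
  have h2' : pvRuns (d0 :: d0 :: tl) = pvRuns (d0 :: tl) := by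
    conv_lhs => rw [pvRuns.eq_def]
    conv_rhs => rw [pvRuns.eq_def]
    simp [pvSkip]
  rw [h2']; ring
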